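-- pv_equiv track=rewrite | github.com/igbinni143/Algorithm | 프로그래머스/0/181935. 홀짝에 따라 다른 값 반환하기/홀짝에 따라 다른 값 반환하기.py | solution
-- ===== SOURCE A (Python) =====
-- def solution(n):
--     total=0
--     if n % 2 ==1:
--         i = n
--         while i>=0:
--             total += i
--             i-=2
--         return total
--
--     else:
--         i = n
--         while i >0 :
--             total += i **2
--             i-=2
--         return total
--
--
--     answer = 0
--     return answer
-- ===== SOURCE B (Python) =====
-- def solution(n):
--     if n < 0:
--         return 0
--     if n % 2 == 1:
--         m = (n + 1) // 2
--         return m * m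
--     m = n // 2
--     return 2 * m * (m + 1) * (2 * m + 1) // 3
-- ===== Notes on version B (the rewrite author's own statement) =====
-- stated objective: faster
-- what changed: Replaces A's linear while-loops with constant-time closed-form arithmetic: the odd sum is the square of the number of odd terms, and the even-square sum uses the standard sum-of-squares formula.
import Mathlib
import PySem

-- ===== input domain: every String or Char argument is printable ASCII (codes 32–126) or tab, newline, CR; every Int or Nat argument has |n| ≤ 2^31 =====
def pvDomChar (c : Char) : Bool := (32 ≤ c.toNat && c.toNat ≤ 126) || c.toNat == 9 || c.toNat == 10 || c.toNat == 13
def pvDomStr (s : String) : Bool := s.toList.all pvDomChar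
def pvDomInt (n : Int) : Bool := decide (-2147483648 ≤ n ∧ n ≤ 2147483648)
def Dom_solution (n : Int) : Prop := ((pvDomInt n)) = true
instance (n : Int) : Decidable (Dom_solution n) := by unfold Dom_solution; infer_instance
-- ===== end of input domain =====

-- B replaces A's O(n) while-loops by O(1) closed-form formulas (asymptotically faster).

-- ===== PORT A =====
-- the odd-branch while loop: while i >= 0: total += i; i -= 2
def pvOddLoop (i total : Int) : Int :=
  if _h : 0 ≤ i then pvOddLoop (i - 2) (total + i) else total
termination_by (i + 2).toNat
decreasing_by omega

-- the even-branch while loop: while i > 0: total += i**2; i -= 2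
def pvEvenLoop (i total : Int) : Int :=
  if _h : 0 < i then pvEvenLoop (i - 2) (total + i ^ 2) else total
termination_by i.toNat
decreasing_by omega

def solution (n : Int) : Int :=
  if PySem.Int.mod n 2 = 1 then pvOddLoop n 0 else pvEvenLoop n 0

-- ===== PORT B =====
def solution_alt (n : Int) : Int :=
  if n < 0 then 0
  else if PySem.Int.mod n 2 = 1 then
    let m := PySem.Int.floordiv (n + 1) 2
    m * m
  else
    let m := PySem.Int.floordiv n 2
    PySem.Int.floordiv (2 * m * (m + 1) * (2 * m + 1)) 3

-- ===== PRECONDITION & SPEC =====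
def Spec_solution (n : Int) (out : Int) : Prop := out = solution_alt n
instance (n : Int) (out : Int) : Decidable (Spec_solution n out) := by unfold Spec_solution; infer_instance

-- ===== CLAIM (what is proved, stated in full; the proofs are below) =====
def Claim_equal_solution : Prop := ∀ (n : Int), Dom_solution n → Spec_solution n (solution n)

-- ===== LEMMAS AND PROOFS =====

lemma pvOddLoop_neg (i t : Int) (h : i < 0) : pvOddLoop i t = t := by
  rw [pvOddLoop]; simp [not_le.mpr h]

lemma pvEvenLoop_nonpos (i t : Int) (h : i ≤ 0) : pvEvenLoop i t = t := by
  rw [pvEvenLoop]; simp [not_lt.mpr h]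

lemma pvOddLoop_closed (k : Nat) : ∀ t : Int, pvOddLoop (2 * (k : Int) + 1) t = t + ((k : Int) + 1) * ((k : Int) + 1) := by
  induction k with
  | zero =>
      intro t
      rw [pvOddLoop]
      simp only [Nat.cast_zero, mul_zero, zero_add, dif_pos (by norm_num : (0:Int) ≤ 1)]
      rw [pvOddLoop_neg _ _ (by norm_num)]
      ring
  | succ k ih =>
      intro t
      rw [pvOddLoop]
      push_cast
      simp only [dif_pos (by omega : (0:Int) ≤ 2 * ((k:Int)+1) + 1)]
      have : (2 * ((k : Int) + 1) + 1) - 2 = 2 * (k : Int) + 1 := by ring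
      rw [this, ih]
      ring

lemma pvEvenLoop_closed (k : Nat) :
    ∀ t : Int, 3 * pvEvenLoop (2 * (k : Int)) t = 3 * t + 2 * (k : Int) * ((k : Int) + 1) * (2 * (k : Int) + 1) := by
  induction k with
  | zero =>
      intro t
      rw [pvEvenLoop_nonpos _ _ (by norm_num)]
      norm_num
  | succ k ih =>
      intro t
      rw [pvEvenLoop]
      push_cast
      simp only [dif_pos (by omega : (0:Int) < 2 * ((k:Int)+1))]
      have : 2 * ((k : Int) + 1) - 2 = 2 * (k : Int) := by ring
      rw [this]
      have h2 := ih (t + (2 * ((k : Int) + 1)) ^ 2)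
      have : 3 * pvEvenLoop (2 * (k:Int)) (t + (2 * ((k : Int) + 1)) ^ 2)
           = 3 * t + 2 * ((k:Int)+1) * (((k:Int)+1) + 1) * (2 * ((k:Int)+1) + 1) := by
        rw [h2]; ring
      linarith [this]

lemma solution_eq_alt (n : Int) : solution n = solution_alt n := by
  have hmod : PySem.Int.mod n 2 = n % 2 := PySem.Int.mod_eq_emod_of_pos (by norm_num)
  unfold solution solution_alt
  rw [hmod]
  by_cases hneg : n < 0
  · by_cases hodd : n % 2 = 1
    · simp only [if_pos hodd, if_pos hneg]
      exact pvOddLoop_neg n 0 hneg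
    · simp only [if_neg hodd, if_pos hneg]
      exact pvEvenLoop_nonpos n 0 (le_of_lt hneg)
  · push_neg at hneg
    by_cases hodd : n % 2 = 1
    · -- n = 2k+1
      obtain ⟨k, hk⟩ : ∃ k : Nat, n = 2 * (k : Int) + 1 := by
        refine ⟨(n / 2).toNat, ?_⟩; omega
      simp only [if_pos hodd, if_neg (not_lt.mpr hneg)]
      have hfd : PySem.Int.floordiv (n + 1) 2 = (n + 1) / 2 :=
        PySem.Int.floordiv_eq_ediv_of_pos (by norm_num)
      rw [hfd, hk, pvOddLoop_closed k 0]
      have : (2 * (k : Int) + 1 + 1) / 2 = (k : Int) + 1 := by omega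
      rw [this]; ring
    · -- n = 2k
      obtain ⟨k, hk⟩ : ∃ k : Nat, n = 2 * (k : Int) := by
        refine ⟨(n / 2).toNat, ?_⟩; omega
      simp only [if_neg hodd, if_neg (not_lt.mpr hneg)]
      have hfd : PySem.Int.floordiv n 2 = n / 2 :=
        PySem.Int.floordiv_eq_ediv_of_pos (by norm_num)
      have hfd3 : ∀ x : Int, PySem.Int.floordiv x 3 = x / 3 :=
        fun x => PySem.Int.floordiv_eq_ediv_of_pos (by norm_num)
      rw [hfd, hfd3, hk]
      have hm : 2 * (k : Int) / 2 = (k : Int) := by omega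
      rw [hm]
      have h3' := pvEvenLoop_closed k 0
      have hval : 2 * (k : Int) * ((k : Int) + 1) * (2 * (k : Int) + 1)
                = 3 * pvEvenLoop (2 * (k : Int)) 0 := by linarith
      rw [hval, Int.mul_ediv_cancel_left _ (by norm_num : (3:Int) ≠ 0)]

-- ===== VERDICT (by name: the statement is the Claim_ definition above) =====
theorem solution_spec : Claim_equal_solution := by
  intro n _
  unfold Spec_solution
  exact solution_eq_alt n
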